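-- pv_equiv track=rewrite | github.com/pratik1133/tikona-research-os-2 | scripts/ppt_service/js_validator.py | fix_shapetype_hallucinations
-- ===== SOURCE A (Python) =====
-- def fix_shapetype_hallucinations(code: str) -> str:
--     """Fix common LLM hallucinations in PptxGenJS code."""
--     replacements = {
--         "pres.ShapeType.rect": "pres.shapes.RECTANGLE",
--         "pres.ShapeType.oval": "pres.shapes.OVAL",
--         "pres.ShapeType.line": "pres.shapes.LINE",
--     }
--     for wrong, right in replacements.items():
--         code = code.replace(wrong, right)
--     return code
-- ===== SOURCE B (Python) =====
-- def fix_shapetype_hallucinations(code: str) -> str: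
--     """Fix common LLM hallucinations in PptxGenJS code (single left-to-right scan)."""
--     replacements = {
--         "pres.ShapeType.rect": "pres.shapes.RECTANGLE",
--         "pres.ShapeType.oval": "pres.shapes.OVAL",
--         "pres.ShapeType.line": "pres.shapes.LINE",
--     }
--     out = []
--     i = 0
--     n = len(code)
--     while i < n:
--         for wrong, right in replacements.items():
--             if code.startswith(wrong, i):
--                 out.append(right)
--                 i += len(wrong)
--                 break
--         else:
--             out.append(code[i])
--             i += 1
--     return "".join(out)
-- ===== Notes on version B (the rewrite author's own statement) =====
-- stated objective: alternative
-- what changed: B replaces A's three sequential full-string str.replace passes by a single left-to-right scan that checks the three patterns at each position and substitutes them simultaneously in one pass.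
import Mathlib
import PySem

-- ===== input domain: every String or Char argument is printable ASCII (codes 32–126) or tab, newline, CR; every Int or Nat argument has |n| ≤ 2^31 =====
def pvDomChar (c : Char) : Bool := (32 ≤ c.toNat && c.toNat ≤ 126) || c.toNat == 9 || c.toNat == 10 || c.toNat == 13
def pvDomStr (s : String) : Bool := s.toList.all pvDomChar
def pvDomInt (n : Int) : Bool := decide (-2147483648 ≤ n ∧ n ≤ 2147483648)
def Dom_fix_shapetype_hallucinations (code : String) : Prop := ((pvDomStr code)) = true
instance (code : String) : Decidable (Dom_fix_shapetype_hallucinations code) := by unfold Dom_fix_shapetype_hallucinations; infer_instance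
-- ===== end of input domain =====

-- B replaces A's three sequential full-string replace passes by ONE left-to-right scan
-- substituting all three patterns simultaneously (objective: alternative, same result).

-- ===== PORT A =====
-- Python dict literal → association list (insertion order); .items() iteration → foldl.
def fix_shapetype_hallucinations (code : String) : String :=
  let replacements : List (String × String) :=
    [("pres.ShapeType.rect", "pres.shapes.RECTANGLE"),
     ("pres.ShapeType.oval", "pres.shapes.OVAL"),
     ("pres.ShapeType.line", "pres.shapes.LINE")]
  replacements.foldl (fun code wr => PySem.Str.replace code wr.1 wr.2) code

-- ===== PORT B =====
def pvW1 : List Char := "pres.ShapeType.rect".toList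
def pvW2 : List Char := "pres.ShapeType.oval".toList
def pvW3 : List Char := "pres.ShapeType.line".toList
def pvR1 : List Char := "pres.shapes.RECTANGLE".toList
def pvR2 : List Char := "pres.shapes.OVAL".toList
def pvR3 : List Char := "pres.shapes.LINE".toList

-- Source B's while-loop over the position i: at each step check the three patterns in dict
-- order with startswith; on a hit emit the replacement and jump past the pattern
-- (all three patterns have length 19, so i advances by 19: drop 18 of the tail),
-- otherwise copy one character. Exact transliteration of the single pass.
def pvOnePass : List Char → List Char
  | [] => []
  | c :: t =>
    if pvW1.isPrefixOf (c :: t) then pvR1 ++ pvOnePass (List.drop 18 t)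
    else if pvW2.isPrefixOf (c :: t) then pvR2 ++ pvOnePass (List.drop 18 t)
    else if pvW3.isPrefixOf (c :: t) then pvR3 ++ pvOnePass (List.drop 18 t)
    else c :: pvOnePass t
termination_by l => l.length
decreasing_by all_goals simp [List.length_drop] <;> omega

def fix_shapetype_hallucinations_alt (code : String) : String :=
  String.ofList (pvOnePass code.toList)

-- ===== PRECONDITION & SPEC =====
def Spec_fix_shapetype_hallucinations (code : String) (out : String) : Prop := out = fix_shapetype_hallucinations_alt code
instance (code : String) (out : String) : Decidable (Spec_fix_shapetype_hallucinations code out) := by unfold Spec_fix_shapetype_hallucinations; infer_instance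

-- ===== CLAIM (what is proved, stated in full; the proofs are below) =====
def Claim_equal_fix_shapetype_hallucinations : Prop := ∀ (code : String), Dom_fix_shapetype_hallucinations code → Spec_fix_shapetype_hallucinations code (fix_shapetype_hallucinations code)

-- ===== LEMMAS AND PROOFS =====

-- Proof-side characterisation of one Python str.replace pass as a left-to-right scan.
def pvScan (w r : List Char) : List Char → List Char
  | [] => []
  | c :: t =>
    if w.isPrefixOf (c :: t) ∧ w ≠ [] then r ++ pvScan w r (List.drop (w.length - 1) t)
    else c :: pvScan w r t
termination_by l => l.length
decreasing_by all_goals simp [List.length_drop] <;> omega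

theorem pvGo_eq_scan (w r : List Char) (hw : w ≠ []) :
    ∀ (fuel : Nat) (l acc : List Char), l.length ≤ fuel →
      PySem.Chars.replace.go w r fuel l acc = acc.reverse ++ pvScan w r l := by
  intro fuel
  induction fuel with
  | zero =>
    intro l acc hl
    have : l = [] := by cases l <;> simp_all
    subst this
    rw [PySem.Chars.replace.go]
    simp [pvScan]
  | succ n ih =>
    intro l acc hl
    cases l with
    | nil =>
      rw [PySem.Chars.replace.go]
      simp [pvScan]
      omega
    | cons c t =>
      rw [PySem.Chars.replace.go]
      by_cases hp : w.isPrefixOf (c :: t) = true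
      · have hlen : 1 ≤ w.length := by cases w <;> simp_all
        have hdrop : List.drop w.length (c :: t) = List.drop (w.length - 1) t := by
          cases w with
          | nil => simp at hw
          | cons a w' => simp [List.drop_succ_cons]
        rw [if_pos hp, ih _ _ (by simp [List.length_drop] at *; omega)]
        rw [pvScan, if_pos ⟨hp, hw⟩, hdrop]
        simp
      · rw [if_neg hp, ih _ _ (by simp at hl; omega)]
        rw [pvScan, if_neg (by simp [hp])]
        simp

theorem pvReplace_eq_scan (s w r : List Char) (hw : w ≠ []) :
    PySem.Chars.replace s w r = pvScan w r s := by
  rw [PySem.Chars.replace]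
  rw [if_neg (by simp [List.isEmpty_iff, hw])]
  simpa using pvGo_eq_scan w r hw s.length s [] le_rfl

-- If u is incomparable with a (neither a prefix of the other), u is not a prefix of a ++ X.
theorem pvNotPrefix_append (u a X : List Char)
    (h1 : u.isPrefixOf a = false) (h2 : a.isPrefixOf u = false) :
    u.isPrefixOf (a ++ X) = false := by
  induction a generalizing u with
  | nil => simp [List.isPrefixOf] at h2
  | cons c a' ih =>
    cases u with
    | nil => simp [List.isPrefixOf] at h1
    | cons d u' =>
      simp only [List.cons_append, List.isPrefixOf_cons₂] at *
      by_cases hdc : d = c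
      · subst hdc
        simp only [beq_self_eq_true, Bool.true_and] at h1 h2 ⊢
        exact ih u' h1 h2
      · simp [hdc]

-- A block a in which no match of w can start (crossing or not) passes through the scan.
theorem pvScan_append_of_noMatch (w r a : List Char)
    (h : ∀ s ∈ a.tails, s ≠ [] → w.isPrefixOf s = false ∧ s.isPrefixOf w = false) :
    ∀ X, pvScan w r (a ++ X) = a ++ pvScan w r X := by
  induction a with
  | nil => intro X; simp
  | cons c a' ih =>
    intro X
    obtain ⟨hwn, hnw⟩ := h (c :: a') ((List.mem_tails _ _).mpr (List.suffix_refl _)) (by simp)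
    have hfalse : w.isPrefixOf ((c :: a') ++ X) = false := pvNotPrefix_append w (c :: a') X hwn hnw
    have hnp : w.isPrefixOf (c :: (a' ++ X)) ≠ true := ne_true_of_eq_false hfalse
    rw [List.cons_append, pvScan, if_neg (fun hc => hnp hc.1)]
    rw [ih (fun s hs hne =>
      h s ((List.mem_tails _ _).mpr (((List.mem_tails _ _).mp hs).trans (List.suffix_cons _ _))) hne) X]
    simp

-- Matching head: scanning w ++ X replaces w and continues after it.
theorem pvScan_match (w r X : List Char) (hw : w ≠ []) :
    pvScan w r (w ++ X) = r ++ pvScan w r X := by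
  cases w with
  | nil => exact absurd rfl hw
  | cons d w' =>
    rw [List.cons_append, pvScan,
        if_pos ⟨by simpa [List.cons_append] using List.isPrefixOf_iff_prefix.mpr ⟨X, rfl⟩, hw⟩]
    simp [List.drop_left]

-- The scan for w/r does not change whether any suffix of pat is a prefix of the string,
-- provided pat's suffixes are incomparable with both w and r.
theorem pvScan_preserves_prefix (w r pat : List Char) (hw : w ≠ [])
    (hfacts : ∀ i, i < pat.length →
      (pat.drop i).isPrefixOf w = false ∧ w.isPrefixOf (pat.drop i) = false ∧
      (pat.drop i).isPrefixOf r = false ∧ r.isPrefixOf (pat.drop i) = false) :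
    ∀ (t : List Char) (i : Nat),
      (pat.drop i).isPrefixOf (pvScan w r t) = (pat.drop i).isPrefixOf t := by
  intro t
  induction t with
  | nil => intro i; simp [pvScan]
  | cons c t' ih =>
    intro i
    by_cases hu : pat.drop i = []
    · simp [hu]
    · have hi : i < pat.length := by
        by_contra hge
        exact hu (List.drop_eq_nil_of_le (by omega))
      obtain ⟨f1, f2, f3, f4⟩ := hfacts i hi
      by_cases hp : w.isPrefixOf (c :: t') = true
      · rw [pvScan, if_pos ⟨hp, hw⟩]
        obtain ⟨rest, hrw⟩ := List.isPrefixOf_iff_prefix.mp hp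
        rw [← hrw, pvNotPrefix_append _ r _ f3 f4, pvNotPrefix_append _ w rest f1 f2]
      · rw [pvScan, if_neg (by simp [hp])]
        rw [List.drop_eq_getElem_cons hi] at *
        simp only [List.isPrefixOf] at *
        rw [ih (i + 1)]

-- Concrete pattern facts, all checked by the kernel (decide).
theorem pvHw1 : pvW1 ≠ [] := by decide
theorem pvHw2 : pvW2 ≠ [] := by decide
theorem pvHw3 : pvW3 ≠ [] := by decide

-- pp hypotheses: suffixes of the later pattern are incomparable with the earlier pass's
-- pattern and replacement.
theorem pvF12 : ∀ i, i < pvW2.length →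
    (pvW2.drop i).isPrefixOf pvW1 = false ∧ pvW1.isPrefixOf (pvW2.drop i) = false ∧
    (pvW2.drop i).isPrefixOf pvR1 = false ∧ pvR1.isPrefixOf (pvW2.drop i) = false := by decide
theorem pvF13 : ∀ i, i < pvW3.length →
    (pvW3.drop i).isPrefixOf pvW1 = false ∧ pvW1.isPrefixOf (pvW3.drop i) = false ∧
    (pvW3.drop i).isPrefixOf pvR1 = false ∧ pvR1.isPrefixOf (pvW3.drop i) = false := by decide
theorem pvF23 : ∀ i, i < pvW3.length →
    (pvW3.drop i).isPrefixOf pvW2 = false ∧ pvW2.isPrefixOf (pvW3.drop i) = false ∧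
    (pvW3.drop i).isPrefixOf pvR2 = false ∧ pvR2.isPrefixOf (pvW3.drop i) = false := by decide

-- skip-block hypotheses: no match of w can start inside the given block.
theorem pvB_w2_w1 : ∀ s ∈ pvW2.tails, s ≠ [] → pvW1.isPrefixOf s = false ∧ s.isPrefixOf pvW1 = false := by decide
theorem pvB_w3_w1 : ∀ s ∈ pvW3.tails, s ≠ [] → pvW1.isPrefixOf s = false ∧ s.isPrefixOf pvW1 = false := by decide
theorem pvB_w3_w2 : ∀ s ∈ pvW3.tails, s ≠ [] → pvW2.isPrefixOf s = false ∧ s.isPrefixOf pvW2 = false := by decide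
theorem pvB_r1_w2 : ∀ s ∈ pvR1.tails, s ≠ [] → pvW2.isPrefixOf s = false ∧ s.isPrefixOf pvW2 = false := by decide
theorem pvB_r1_w3 : ∀ s ∈ pvR1.tails, s ≠ [] → pvW3.isPrefixOf s = false ∧ s.isPrefixOf pvW3 = false := by decide
theorem pvB_r2_w3 : ∀ s ∈ pvR2.tails, s ≠ [] → pvW3.isPrefixOf s = false ∧ s.isPrefixOf pvW3 = false := by decide

-- The heart of the equivalence: the three sequential scans equal the single pass.
theorem pvMain : ∀ (n : Nat) (l : List Char), l.length ≤ n →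
    pvScan pvW3 pvR3 (pvScan pvW2 pvR2 (pvScan pvW1 pvR1 l)) = pvOnePass l := by
  intro n
  induction n with
  | zero =>
    intro l hl
    have : l = [] := by cases l <;> simp_all
    subst this
    simp [pvScan, pvOnePass]
  | succ n ih =>
    intro l hl
    cases l with
    | nil => simp [pvScan, pvOnePass]
    | cons c t =>
      have ht : t.length ≤ n := by simp at hl; omega
      have hd : (List.drop 18 t).length ≤ n := by simp [List.length_drop]; omega
      cases h1 : pvW1.isPrefixOf (c :: t) with
      | true =>
        have e1 : pvScan pvW1 pvR1 (c :: t) = pvR1 ++ pvScan pvW1 pvR1 (List.drop 18 t) := by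
          rw [pvScan, if_pos ⟨h1, pvHw1⟩, show pvW1.length - 1 = 18 from by decide]
        rw [e1, pvScan_append_of_noMatch pvW2 pvR2 pvR1 pvB_r1_w2,
            pvScan_append_of_noMatch pvW3 pvR3 pvR1 pvB_r1_w3,
            ih _ hd, pvOnePass, if_pos h1]
      | false =>
        cases h2 : pvW2.isPrefixOf (c :: t) with
        | true =>
          obtain ⟨rest, hr⟩ := List.isPrefixOf_iff_prefix.mp h2
          have hrest : rest = List.drop 18 t := by
            have hdl := List.drop_left (l₁ := pvW2) (l₂ := rest)
            rw [hr, show pvW2.length = 19 from by decide,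
                show (19 : Nat) = 18 + 1 from rfl, List.drop_succ_cons] at hdl
            exact hdl.symm
          rw [← hr, pvScan_append_of_noMatch pvW1 pvR1 pvW2 pvB_w2_w1,
              pvScan_match pvW2 pvR2 _ pvHw2,
              pvScan_append_of_noMatch pvW3 pvR3 pvR2 pvB_r2_w3,
              hrest, ih _ hd]
          rw [show (pvW2 ++ List.drop 18 t : List Char) = c :: t by rw [← hrest, hr]]
          rw [pvOnePass, if_neg (ne_true_of_eq_false h1), if_pos h2]
        | false =>
          cases h3 : pvW3.isPrefixOf (c :: t) with
          | true =>
            obtain ⟨rest, hr⟩ := List.isPrefixOf_iff_prefix.mp h3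
            have hrest : rest = List.drop 18 t := by
              have hdl := List.drop_left (l₁ := pvW3) (l₂ := rest)
              rw [hr, show pvW3.length = 19 from by decide,
                  show (19 : Nat) = 18 + 1 from rfl, List.drop_succ_cons] at hdl
              exact hdl.symm
            rw [← hr, pvScan_append_of_noMatch pvW1 pvR1 pvW3 pvB_w3_w1,
                pvScan_append_of_noMatch pvW2 pvR2 pvW3 pvB_w3_w2,
                pvScan_match pvW3 pvR3 _ pvHw3,
                hrest, ih _ hd]
            rw [show (pvW3 ++ List.drop 18 t : List Char) = c :: t by rw [← hrest, hr]]
            rw [pvOnePass, if_neg (ne_true_of_eq_false h1), if_neg (ne_true_of_eq_false h2),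
                if_pos h3]
          | false =>
            have e1 : pvScan pvW1 pvR1 (c :: t) = c :: pvScan pvW1 pvR1 t := by
              rw [pvScan, if_neg (fun hc => (ne_true_of_eq_false h1) hc.1)]
            have key2 : pvW2.isPrefixOf (c :: pvScan pvW1 pvR1 t) = false := by
              rw [← e1]
              have hpp := pvScan_preserves_prefix pvW1 pvR1 pvW2 pvHw1 pvF12 (c :: t) 0
              simp only [List.drop_zero] at hpp
              rw [hpp, h2]
            have e2 : pvScan pvW2 pvR2 (c :: pvScan pvW1 pvR1 t) =
                c :: pvScan pvW2 pvR2 (pvScan pvW1 pvR1 t) := by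
              rw [pvScan, if_neg (fun hc => (ne_true_of_eq_false key2) hc.1)]
            have key3 : pvW3.isPrefixOf (c :: pvScan pvW2 pvR2 (pvScan pvW1 pvR1 t)) = false := by
              rw [← e2, ← e1]
              have hpp2 := pvScan_preserves_prefix pvW2 pvR2 pvW3 pvHw2 pvF23
                (pvScan pvW1 pvR1 (c :: t)) 0
              have hpp1 := pvScan_preserves_prefix pvW1 pvR1 pvW3 pvHw1 pvF13 (c :: t) 0
              simp only [List.drop_zero] at hpp1 hpp2
              rw [hpp2, hpp1, h3]
            have e3 : pvScan pvW3 pvR3 (c :: pvScan pvW2 pvR2 (pvScan pvW1 pvR1 t)) =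
                c :: pvScan pvW3 pvR3 (pvScan pvW2 pvR2 (pvScan pvW1 pvR1 t)) := by
              rw [pvScan, if_neg (fun hc => (ne_true_of_eq_false key3) hc.1)]
            rw [e1, e2, e3, ih _ ht, pvOnePass, if_neg (ne_true_of_eq_false h1),
                if_neg (ne_true_of_eq_false h2), if_neg (ne_true_of_eq_false h3)]

-- ===== VERDICT (by name: the statement is the Claim_ definition above) =====
theorem fix_shapetype_hallucinations_spec : Claim_equal_fix_shapetype_hallucinations := by
  intro code _
  show fix_shapetype_hallucinations code = fix_shapetype_hallucinations_alt code
  unfold fix_shapetype_hallucinations fix_shapetype_hallucinations_alt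
  apply String.toList_inj.mp
  simp only [List.foldl, String.toList_ofList, PySem.Str.toList_replace]
  rw [pvReplace_eq_scan _ _ _ (by decide), pvReplace_eq_scan _ _ _ (by decide),
      pvReplace_eq_scan _ _ _ (by decide)]
  exact pvMain code.toList.length code.toList le_rfl
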